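-- pv_equiv track=rewrite | github.com/kohlivrinda/crawldoctor | app/background/jobs/recompute_journey.py | _extract_profile_from_values
-- ===== SOURCE A (Python) =====
-- from typing import Any, Dict, List, Optional
--
-- def _extract_profile_from_values(form_vals: Optional[Dict]) -> tuple:
--     """Extract email and name from a form_values dict."""
--     if not form_vals or not isinstance(form_vals, dict):
--         return None, None
--     email = None
--     name = None
--     for k, v in form_vals.items():
--         if v is None or str(v).strip() == "":
--             continue
--         kl = str(k).lower()
--         if not email and ("email" in kl or "mail" in kl) and "@" in str(v):
--             email = str(v).strip()
--         if not name and ("name" in kl or "user" in kl or "full" in kl):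
--             name = str(v).strip()
--     return email, name
-- ===== SOURCE B (Python) =====
-- def _extract_profile_from_values(form_vals):
--     """Extract email and name from a form_values dict.
--
--     Two independent first-match searches instead of A's fused stateful loop."""
--     if not form_vals or not isinstance(form_vals, dict):
--         return None, None
--
--     def usable(v):
--         return v is not None and str(v).strip() != ""
--
--     email = next((str(v).strip() for k, v in form_vals.items()
--                   if usable(v)
--                   and ("email" in str(k).lower() or "mail" in str(k).lower())
--                   and "@" in str(v)), None)
--     name = next((str(v).strip() for k, v in form_vals.items()
--                  if usable(v)
--                  and ("name" in str(k).lower() or "user" in str(k).lower()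
--                       or "full" in str(k).lower())), None)
--     return email, name
-- ===== Notes on version B (the rewrite author's own statement) =====
-- stated objective: simpler
-- what changed: Replaces the fused loop that threads two mutable accumulators (email, name) with two independent first-match searches (next over a generator), one per field; the first-match-wins semantics makes the state machine unnecessary.
import Mathlib
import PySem

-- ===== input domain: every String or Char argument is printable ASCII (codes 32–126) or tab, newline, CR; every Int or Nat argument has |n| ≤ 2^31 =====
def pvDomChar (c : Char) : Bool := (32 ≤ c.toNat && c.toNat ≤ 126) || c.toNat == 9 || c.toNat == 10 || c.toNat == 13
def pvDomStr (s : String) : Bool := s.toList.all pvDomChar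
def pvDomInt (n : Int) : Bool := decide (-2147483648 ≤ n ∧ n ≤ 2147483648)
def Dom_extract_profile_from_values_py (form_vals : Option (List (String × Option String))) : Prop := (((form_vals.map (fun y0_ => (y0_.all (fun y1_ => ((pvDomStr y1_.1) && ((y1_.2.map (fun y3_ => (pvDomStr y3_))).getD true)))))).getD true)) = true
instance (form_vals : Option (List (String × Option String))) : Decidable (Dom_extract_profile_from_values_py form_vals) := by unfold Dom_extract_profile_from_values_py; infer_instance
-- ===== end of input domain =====

-- B replaces A's fused loop threading two accumulators with two independent first-match
-- searches, one per field (objective: simpler decomposition, same cost).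

-- ===== PORT A =====
-- Python truthiness of an Optional[str]: falsy iff None or "".
def pvStrFalsy (e : Option String) : Bool :=
  match e with
  | none => true
  | some s => s == ""

-- the 'for k, v in form_vals.items()' loop with accumulators email, name
def pvLoopA : List (String × Option String) → Option String → Option String → Option String × Option String
  | [], email, name => (email, name)
  | (k, v) :: rest, email, name =>
    match v with
    | none => pvLoopA rest email name
    | some s =>
      if PySem.Str.strip s == "" then pvLoopA rest email name
      else
        let kl := PySem.Str.lower k
        let email' := if pvStrFalsy email && (PySem.Str.isIn "email" kl || PySem.Str.isIn "mail" kl) && PySem.Str.isIn "@" s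
                      then some (PySem.Str.strip s) else email
        let name' := if pvStrFalsy name && (PySem.Str.isIn "name" kl || PySem.Str.isIn "user" kl || PySem.Str.isIn "full" kl)
                     then some (PySem.Str.strip s) else name
        pvLoopA rest email' name'

def extract_profile_from_values_py (form_vals : Option (List (String × Option String))) : Option String × Option String :=
  match form_vals with
  | none => (none, none)
  | some pairs =>
    if pairs = [] then (none, none)
    else pvLoopA (PySem.Dict.ofList pairs).items none none

-- ===== PORT B =====
-- usable(v): v is not None and str(v).strip() != ""
def pvUsable (v : Option String) : Bool :=
  match v with
  | none => false
  | some s => !(PySem.Str.strip s == "")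

-- first row whose key looks like an email key, value usable and containing '@'
def pvFindEmail : List (String × Option String) → Option String
  | [] => none
  | (k, v) :: rest =>
    if pvUsable v
       && (PySem.Str.isIn "email" (PySem.Str.lower k) || PySem.Str.isIn "mail" (PySem.Str.lower k))
       && (match v with | none => false | some s => PySem.Str.isIn "@" s)
    then some (PySem.Str.strip ((v).getD ""))
    else pvFindEmail rest

-- first row whose key looks like a name key, value usable
def pvFindName : List (String × Option String) → Option String
  | [] => none
  | (k, v) :: rest =>
    if pvUsable v
       && (PySem.Str.isIn "name" (PySem.Str.lower k) || PySem.Str.isIn "user" (PySem.Str.lower k) || PySem.Str.isIn "full" (PySem.Str.lower k))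
    then some (PySem.Str.strip ((v).getD ""))
    else pvFindName rest

def extract_profile_from_values_py_alt (form_vals : Option (List (String × Option String))) : Option String × Option String :=
  match form_vals with
  | none => (none, none)
  | some pairs =>
    if pairs = [] then (none, none)
    else
      let items := (PySem.Dict.ofList pairs).items
      (pvFindEmail items, pvFindName items)

-- ===== PRECONDITION & SPEC =====
def Spec_extract_profile_from_values_py (form_vals : Option (List (String × Option String))) (out : Option String × Option String) : Prop := out = extract_profile_from_values_py_alt form_vals
instance (form_vals : Option (List (String × Option String))) (out : Option String × Option String) : Decidable (Spec_extract_profile_from_values_py form_vals out) := by unfold Spec_extract_profile_from_values_py; infer_instance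

-- ===== CLAIM (what is proved, stated in full; the proofs are below) =====
def Claim_equal_extract_profile_from_values_py : Prop := ∀ (form_vals : Option (List (String × Option String))), Dom_extract_profile_from_values_py form_vals → Spec_extract_profile_from_values_py form_vals (extract_profile_from_values_py form_vals)

-- ===== LEMMAS AND PROOFS =====
-- A's fused loop from state (e, n) computes, per coordinate, the first match unless the
-- accumulator is already truthy; each set value is a nonempty strip, hence truthy.
theorem pvLoopA_eq (l : List (String × Option String)) (e n : Option String) :
    pvLoopA l e n =
      ((if pvStrFalsy e then (pvFindEmail l).or e else e),
       (if pvStrFalsy n then (pvFindName l).or n else n)) := by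
  induction l generalizing e n with
  | nil => simp [pvLoopA, pvFindEmail, pvFindName, Option.none_or]
  | cons p rest ih =>
    obtain ⟨k, v⟩ := p
    match v with
    | none => simp [pvLoopA, pvFindEmail, pvFindName, pvUsable, ih]
    | some s =>
      by_cases hs : PySem.Str.strip s == ""
      · simp [pvLoopA, pvFindEmail, pvFindName, pvUsable, hs, ih]
      · have hs' : (PySem.Str.strip s == "") = false := by simpa using hs
        have hstrip : pvStrFalsy (some (PySem.Str.strip s)) = false := by
          simp [pvStrFalsy]; simpa using hs
        simp only [pvLoopA, hs', Bool.false_eq_true, if_false, ih]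
        simp only [pvFindEmail, pvFindName, pvUsable, hs', Bool.not_false, Bool.true_and]
        refine Prod.ext ?_ ?_ <;> dsimp only <;> split_ifs <;>
          simp_all [pvStrFalsy, Option.some_or]

-- ===== VERDICT (by name: the statement is the Claim_ definition above) =====
theorem extract_profile_from_values_py_spec : Claim_equal_extract_profile_from_values_py := by
  intro form_vals _
  unfold Spec_extract_profile_from_values_py
  match form_vals with
  | none => rfl
  | some pairs =>
    simp only [extract_profile_from_values_py, extract_profile_from_values_py_alt]
    split
    · rfl
    · rw [pvLoopA_eq]; simp [pvStrFalsy, Option.or_none]
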